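-- pv_equiv track=rewrite | github.com/oppressionslayer/maxentropy | XORWithHuffmanCodeTableCompressed.py | decodethebetterstuffplusminux
-- ===== SOURCE A (Python) =====
-- def decodethebetterstuffplusminux(themap):
--   j=0
--   y=1
--   for c in range(0,len(themap)):
--      if j < 0:
--         if themap[c] == '-':
--             j^=y
--         else:
--             j^=-y
--      else:
--         if themap[c] == '-':
--             j^=-y
--         else:
--             j^=y
--      y<<=1
--   answer=((y>>1)-1)-(abs(j)>>1)
--   return answer
-- ===== SOURCE B (Python) =====
-- def decodethebetterstuffplusminux(themap):
--     # Suffix-parity decoder: bit m of the answer is the parity of the number of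
--     # dash/non-dash transitions strictly after position m; scanned back-to-front,
--     # one bit character per position, converted to an int once at the end.
--     p = False
--     bits = []
--     rev = themap[::-1]
--     for a, b in zip(rev, rev[1:]):       # (themap[m+1], themap[m]) for m = n-2 .. 0
--         p ^= (a == '-') != (b == '-')
--         bits.append('0' if p else '1')
--     acc = int('0' + ''.join(bits), 2)
--     return (1 << len(themap) >> 1) - 1 - acc
-- ===== Notes on version B (the rewrite author's own statement) =====
-- stated objective: faster
-- what changed: A maintains an arbitrary-precision integer j updated by sign-dependent XOR with +/-2^k at each step and takes abs at the end; B never builds big integers in the loop: it scans the string once back-to-front tracking the parity of dash/non-dash transitions, emits one answer bit per position, and converts the bit string to an int once.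
import Mathlib
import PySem

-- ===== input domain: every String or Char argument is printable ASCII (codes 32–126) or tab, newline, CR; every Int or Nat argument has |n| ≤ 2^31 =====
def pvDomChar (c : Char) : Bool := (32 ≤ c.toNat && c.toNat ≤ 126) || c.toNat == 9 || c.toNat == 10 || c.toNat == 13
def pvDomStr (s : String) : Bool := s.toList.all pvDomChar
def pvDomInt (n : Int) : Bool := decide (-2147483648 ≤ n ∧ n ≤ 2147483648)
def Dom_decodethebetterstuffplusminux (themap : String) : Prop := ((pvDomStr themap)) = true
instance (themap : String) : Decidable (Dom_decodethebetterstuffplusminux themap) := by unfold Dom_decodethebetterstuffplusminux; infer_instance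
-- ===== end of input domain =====

-- B replaces A's quadratic big-int XOR state machine by a linear back-to-front
-- transition-parity scan that assembles the answer's bits directly (objective: faster).

-- ===== PORT A =====
-- loop body of A: j is updated by XOR with ±y depending on sign and character; y doubles
def stepA (s : Int × Int) (c : Char) : Int × Int :=
  let j :=
    if s.1 < 0 then
      (if c = '-' then PySem.Int.bxor s.1 s.2 else PySem.Int.bxor s.1 (-s.2))
    else
      (if c = '-' then PySem.Int.bxor s.1 (-s.2) else PySem.Int.bxor s.1 s.2)
  (j, s.2 <<< (1 : Nat))

def decodethebetterstuffplusminux (themap : String) : Int :=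
  let s := themap.toList.foldl stepA (0, 1)
  ((s.2 >>> (1 : Nat)) - 1) - (|s.1| >>> (1 : Nat))

-- ===== PORT B =====
-- loop body of B: p accumulates transition parity over the reversed string; one bit char per pair
def stepB (s : Bool × List Char) (ab : Char × Char) : Bool × List Char :=
  let p := s.1 ^^ ((ab.1 == '-') != (ab.2 == '-'))
  (p, s.2 ++ [if p then '0' else '1'])

-- int(bits, 2) : value of a big-endian binary digit string
def binVal (l : List Char) : Int :=
  l.foldl (fun a c => 2 * a + (if c == '1' then 1 else 0)) 0

def decodethebetterstuffplusminux_alt (themap : String) : Int :=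
  let rev := themap.toList.reverse
  let pb := (rev.zip rev.tail).foldl stepB (false, [])
  let acc := binVal ('0' :: pb.2)
  (((1 : Int) <<< themap.toList.length) >>> (1 : Nat)) - 1 - acc

-- ===== PRECONDITION & SPEC =====
def Spec_decodethebetterstuffplusminux (themap : String) (out : Int) : Prop := out = decodethebetterstuffplusminux_alt themap
instance (themap : String) (out : Int) : Decidable (Spec_decodethebetterstuffplusminux themap out) := by unfold Spec_decodethebetterstuffplusminux; infer_instance

-- ===== CLAIM (what is proved, stated in full; the proofs are below) =====
def Claim_equal_decodethebetterstuffplusminux : Prop := ∀ (themap : String), Dom_decodethebetterstuffplusminux themap → Spec_decodethebetterstuffplusminux themap (decodethebetterstuffplusminux themap)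

-- ===== LEMMAS AND PROOFS =====

-- dash test
def dsh (c : Char) : Bool := c == '-'

-- little-endian ±1 sum: the value A's j holds after the loop
def sgnSum : List Char → Int
  | [] => 0
  | c :: t => (if dsh c then -1 else 1) + 2 * sgnSum t

-- little-endian count of positions whose dash-ness equals d
def cnt (d : Bool) : List Char → Int
  | [] => 0
  | c :: t => (if dsh c == d then 1 else 0) + 2 * cnt d t

-- ---- Nat xor facts ----
lemma nat_xor_two_pow (k a : ℕ) (h : a < 2 ^ k) : a ^^^ 2 ^ k = a + 2 ^ k := by
  induction k generalizing a with
  | zero => interval_cases a; rfl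
  | succ k ih =>
    have hp : (0:ℕ) < 2 ^ k := Nat.two_pow_pos k
    have h2 : a / 2 < 2 ^ k := by omega
    have hd : (a ^^^ 2 ^ (k+1)) / 2 = a / 2 + 2 ^ k := by
      rw [Nat.xor_div_two]
      have : 2 ^ (k+1) / 2 = 2 ^ k := by omega
      rw [this, ih _ h2]
    have hm : (a ^^^ 2 ^ (k+1)) % 2 = a % 2 := by
      rw [Nat.xor_mod_two_eq]; omega
    omega

lemma nat_xor_ones (k a : ℕ) (h : a < 2 ^ k) : a ^^^ (2 ^ k - 1) = 2 ^ k - 1 - a := by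
  induction k generalizing a with
  | zero => interval_cases a; rfl
  | succ k ih =>
    have hp : (0:ℕ) < 2 ^ k := Nat.two_pow_pos k
    have h2 : a / 2 < 2 ^ k := by omega
    have hd : (a ^^^ (2 ^ (k+1) - 1)) / 2 = 2 ^ k - 1 - a / 2 := by
      rw [Nat.xor_div_two]
      have : (2 ^ (k+1) - 1) / 2 = 2 ^ k - 1 := by omega
      rw [this, ih _ h2]
    have hm : (a ^^^ (2 ^ (k+1) - 1)) % 2 = (a + 1) % 2 := by
      rw [Nat.xor_mod_two_eq]
      have : (2 ^ (k+1) - 1) % 2 = 1 := by omega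
      omega
    omega

-- ---- the four Int xor identities, for y = 2^k ----
lemma toNat_two_pow (k : ℕ) : ((2:ℤ) ^ k).toNat = 2 ^ k := by
  rw [show ((2:ℤ) ^ k) = ((2 ^ k : ℕ) : ℤ) by push_cast; ring, Int.toNat_natCast]

lemma natCast_two_pow (k : ℕ) : (((2:ℕ) ^ k : ℕ) : ℤ) = 2 ^ k := by
  rw [← toNat_two_pow k, Int.toNat_of_nonneg (by positivity)]

lemma bxor_pos_pos (k : ℕ) (j : ℤ) (h0 : 0 ≤ j) (h : j < 2 ^ k) :
    PySem.Int.bxor j (2 ^ k) = j + 2 ^ k := by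
  have hb : (0:ℤ) ≤ 2 ^ k := by positivity
  have hN := natCast_two_pow k
  rw [PySem.Int.bxor, if_pos h0, if_pos hb, toNat_two_pow,
      nat_xor_two_pow k j.toNat (by omega)]
  omega

lemma bxor_neg_pos (k : ℕ) (j : ℤ) (h0 : j < 0) (h : -(2 ^ k) ≤ j) :
    PySem.Int.bxor j (2 ^ k) = j - 2 ^ k := by
  have hb : (0:ℤ) ≤ 2 ^ k := by positivity
  have hN := natCast_two_pow k
  rw [PySem.Int.bxor, if_neg (by omega), if_pos hb, toNat_two_pow,
      nat_xor_two_pow k (-j-1).toNat (by omega)]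
  omega

lemma bxor_pos_neg (k : ℕ) (j : ℤ) (h0 : 0 ≤ j) (h : j < 2 ^ k) :
    PySem.Int.bxor j (-(2 ^ k)) = j - 2 ^ k := by
  have hN := natCast_two_pow k
  have h1 : (1:ℕ) ≤ 2 ^ k := Nat.one_le_two_pow
  have he : (-(-((2:ℤ) ^ k)) - 1).toNat = 2 ^ k - 1 := by
    rw [show (-(-((2:ℤ) ^ k)) - 1) = ((2 ^ k - 1 : ℕ) : ℤ) by omega, Int.toNat_natCast]
  rw [PySem.Int.bxor, if_pos h0, if_neg (by omega), he,
      nat_xor_ones k j.toNat (by omega)]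
  omega

lemma bxor_neg_neg (k : ℕ) (j : ℤ) (h0 : j < 0) (h : -(2 ^ k) ≤ j) :
    PySem.Int.bxor j (-(2 ^ k)) = j + 2 ^ k := by
  have hN := natCast_two_pow k
  have h1 : (1:ℕ) ≤ 2 ^ k := Nat.one_le_two_pow
  have he : (-(-((2:ℤ) ^ k)) - 1).toNat = 2 ^ k - 1 := by
    rw [show (-(-((2:ℤ) ^ k)) - 1) = ((2 ^ k - 1 : ℕ) : ℤ) by omega, Int.toNat_natCast]
  rw [PySem.Int.bxor, if_neg (by omega), if_neg (by omega), he,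
      nat_xor_ones k (-j-1).toNat (by omega)]
  omega

-- ---- A's loop ----
lemma stepA_eq (k : ℕ) (j : ℤ) (c : Char) (h : |j| < 2 ^ k) :
    stepA (j, 2 ^ k) c = (j + (if dsh c then -1 else 1) * 2 ^ k, 2 ^ (k+1)) := by
  have habs := abs_lt.mp h
  have hsh : ((2:ℤ) ^ k) <<< (1:Nat) = 2 ^ (k+1) := by
    rw [Int.shiftLeft_eq]; ring
  simp only [stepA, Prod.mk.injEq]
  refine ⟨?_, hsh⟩
  by_cases hc : c = '-'
  · rcases lt_or_ge j 0 with hj | hj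
    · rw [if_pos hj, if_pos hc, bxor_neg_pos k j hj (by omega)]
      simp [dsh, hc]; ring
    · rw [if_neg (not_lt.mpr hj), if_pos hc, bxor_pos_neg k j hj (by omega)]
      simp [dsh, hc]; ring
  · rcases lt_or_ge j 0 with hj | hj
    · rw [if_pos hj, if_neg hc, bxor_neg_neg k j hj (by omega)]
      simp [dsh, hc]
    · rw [if_neg (not_lt.mpr hj), if_neg hc, bxor_pos_pos k j hj (by omega)]
      simp [dsh, hc]

lemma foldA (cs : List Char) : ∀ (k : ℕ) (j : ℤ), |j| < 2 ^ k →
    cs.foldl stepA (j, 2 ^ k) = (j + 2 ^ k * sgnSum cs, 2 ^ (k + cs.length)) := by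
  induction cs with
  | nil => intro k j h; simp [sgnSum]
  | cons c t ih =>
    intro k j h
    have habs := abs_lt.mp h
    have hp : (0:ℤ) < 2 ^ k := by positivity
    rw [List.foldl_cons, stepA_eq k j c h]
    have hb : |j + (if dsh c then -1 else 1) * 2 ^ k| < 2 ^ (k+1) := by
      rw [abs_lt, pow_succ]; constructor <;> split_ifs <;> nlinarith
    rw [ih (k+1) _ hb]
    refine Prod.ext ?_ ?_
    · show _ = j + 2 ^ k * sgnSum (c :: t)
      simp only [sgnSum]
      split_ifs <;> ring
    · show (2:ℤ) ^ (k + 1 + t.length) = 2 ^ (k + (c :: t).length)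
      simp [List.length_cons]; ring_nf

-- ---- sign / magnitude of sgnSum ----
lemma cnt_append (d : Bool) (t : List Char) (c : Char) :
    cnt d (t ++ [c]) = cnt d t + (if dsh c == d then 1 else 0) * 2 ^ t.length := by
  induction t with
  | nil => simp [cnt]
  | cons a t ih => simp only [List.cons_append, cnt, ih, List.length_cons]; ring

lemma cnt_nonneg (d : Bool) (t : List Char) : 0 ≤ cnt d t := by
  induction t with
  | nil => simp [cnt]
  | cons a t ih => simp only [cnt]; split_ifs <;> omega

lemma cnt_self_concat (t : List Char) (c : Char) :
    cnt (dsh c) (t ++ [c]) = cnt (dsh c) t + 2 ^ t.length := by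
  rw [cnt_append]; simp

lemma sgnSum_signed (c : Char) (t : List Char) :
    (if dsh c then -sgnSum (t ++ [c]) else sgnSum (t ++ [c]))
      = 2 * cnt (dsh c) (t ++ [c]) - 2 ^ (t.length + 1) + 1 := by
  induction t with
  | nil => by_cases hd : dsh c <;> simp [sgnSum, cnt, hd]
  | cons a t ih =>
    simp only [List.cons_append, sgnSum, cnt, List.length_cons]
    rw [pow_succ]
    by_cases hd : dsh c <;> by_cases ha : dsh a <;>
      simp [hd, ha] at ih ⊢ <;> linarith [ih]

lemma abs_sgnSum (c : Char) (t : List Char) :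
    |sgnSum (t ++ [c])| = 2 * cnt (dsh c) (t ++ [c]) - 2 ^ (t.length + 1) + 1 := by
  have hs := sgnSum_signed c t
  have hge : 2 ^ t.length ≤ cnt (dsh c) (t ++ [c]) := by
    rw [cnt_self_concat]; have := cnt_nonneg (dsh c) t; omega
  have hpos : 0 ≤ 2 * cnt (dsh c) (t ++ [c]) - 2 ^ (t.length + 1) + 1 := by
    rw [pow_succ]; omega
  by_cases hd : dsh c
  · rw [if_pos hd] at hs
    rw [abs_of_nonpos (by omega), hs]
  · rw [if_neg hd] at hs
    rw [abs_of_nonneg (by omega), hs]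

-- ---- B's loop ----
lemma bool_chain (x y z : Bool) : ((x != y) ^^ (y != z)) = (x != z) := by
  cases x <;> cases y <;> cases z <;> rfl

lemma bool_bit (x y : Bool) :
    (if (x != y) = true then '0' else '1') = (if (y == x) = true then '1' else '0') := by
  cases x <;> cases y <;> rfl

lemma zipfoldB (d : Bool) (l : List Char) : ∀ (a : Char) (bits : List Char),
    (((a :: l).zip l).foldl stepB (d != dsh a, bits)).2
      = bits ++ l.map (fun c => if dsh c == d then '1' else '0') := by
  induction l with
  | nil => intro a bits; simp
  | cons b t ih =>
    intro a bits
    rw [List.zip_cons_cons, List.foldl_cons]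
    have hx : stepB (d != dsh a, (bits : List Char)) (a, b)
        = (d != dsh b, bits ++ [if dsh b == d then '1' else '0']) := by
      simp only [stepB]
      refine Prod.ext ?_ ?_
      · show ((d != dsh a) ^^ ((a == '-') != (b == '-'))) = (d != dsh b)
        rw [show (a == '-') = dsh a from rfl, show (b == '-') = dsh b from rfl]
        exact bool_chain d (dsh a) (dsh b)
      · show bits ++ [if ((d != dsh a) ^^ ((a == '-') != (b == '-'))) = true then '0' else '1'] = _
        rw [show (a == '-') = dsh a from rfl, show (b == '-') = dsh b from rfl,
            bool_chain d (dsh a) (dsh b), bool_bit d (dsh b)]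
    rw [hx, ih b]
    simp

lemma binVal_map (d : Bool) (l : List Char) : ∀ (a : ℤ),
    (l.map (fun c => if dsh c == d then '1' else '0')).foldl
        (fun a c => 2 * a + (if c == '1' then 1 else 0)) a
      = a * 2 ^ l.length + cnt d l.reverse := by
  induction l with
  | nil => intro a; simp [cnt]
  | cons x t ih =>
    intro a
    simp only [List.map_cons, List.foldl_cons]
    rw [ih, List.reverse_cons, cnt_append, List.length_reverse, List.length_cons]
    have hbit : (if ((if dsh x == d then '1' else '0') == '1') = true then (1:ℤ) else 0)
        = (if (dsh x == d) = true then 1 else 0) := by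
      by_cases h : (dsh x == d) = true <;> simp [h]
    rw [hbit, pow_succ]
    split_ifs <;> ring

-- ---- main list-level equality ----
lemma ports_eq (cs : List Char) :
    ((cs.foldl stepA (0, 1)).2 >>> (1:Nat) - 1) - (|(cs.foldl stepA (0, 1)).1| >>> (1:Nat))
      = (((1 : Int) <<< cs.length) >>> (1 : Nat)) - 1
          - binVal ('0' :: ((cs.reverse.zip cs.reverse.tail).foldl stepB (false, [])).2) := by
  induction cs using List.reverseRecOn with
  | nil => decide
  | append_singleton t c _ih =>
    -- A side
    have hA := foldA (t ++ [c]) 0 0 (by norm_num)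
    rw [pow_zero] at hA
    rw [hA]
    -- B side
    have hrev : (t ++ [c]).reverse = c :: t.reverse := by simp
    have hfalse : (false : Bool) = ((dsh c) != dsh c) := by simp
    rw [hrev]
    show _ = (((1 : Int) <<< (t ++ [c]).length) >>> (1 : Nat)) - 1
        - binVal ('0' :: (((c :: t.reverse).zip t.reverse).foldl stepB (false, [])).2)
    rw [hfalse, zipfoldB (dsh c) t.reverse c []]
    have hbin : binVal ('0' :: ([] ++ t.reverse.map (fun x => if dsh x == dsh c then '1' else '0')))
        = cnt (dsh c) t := by
      simp only [List.nil_append, binVal, List.foldl_cons]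
      have h0 : (2 * (0:ℤ) + (if ('0' == '1') = true then 1 else 0)) = 0 := by decide
      rw [h0, binVal_map (dsh c) t.reverse 0, List.reverse_reverse, List.length_reverse]
      ring
    rw [hbin]
    -- arithmetic
    have habs := abs_sgnSum c t
    have hcnt := cnt_self_concat t c
    have hnn := cnt_nonneg (dsh c) t
    have hq : (0:ℤ) < 2 ^ t.length := by positivity
    have hlen : (t ++ [c]).length = t.length + 1 := by simp
    rw [hlen]
    simp only [zero_add, one_mul, Int.shiftLeft_eq, Int.shiftRight_eq_div_pow, pow_one]
    rw [habs, hcnt, pow_succ]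
    omega

-- ===== VERDICT (by name: the statement is the Claim_ definition above) =====
theorem decodethebetterstuffplusminux_spec : Claim_equal_decodethebetterstuffplusminux := by
  intro themap _
  unfold Spec_decodethebetterstuffplusminux decodethebetterstuffplusminux decodethebetterstuffplusminux_alt
  exact ports_eq themap.toList
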